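-- pv_equiv track=rewrite | github.com/vjsingh1984/victor-invest | archive/utils-dead-code/prompt_manager_enhanced.py | _optimize_fundamental_data
-- ===== SOURCE A (Python) =====
-- def _optimize_fundamental_data(fundamental_data: str, max_chars: int, symbol: str) -> str:
--     """Optimize fundamental data to fit context limits"""
--     if len(fundamental_data) <= max_chars:
--         return fundamental_data
--
--     # Priority sections to extract
--     priority_keywords = [
--         "COMPREHENSIVE FUNDAMENTAL ANALYSIS",
--         "QUARTERLY ANALYSES:",
--         "MULTI-QUARTER TRENDS:",
--         "OVERALL FUNDAMENTAL ASSESSMENT:",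
--         "Financial Health Score:",
--         "Business Quality Score:",
--         "Growth Prospects Score:",
--         "Key Insights:",
--         "Investment Thesis:",
--         "Revenue",
--         "Net Income",
--         "EPS",
--         "Cash Flow",
--         "Debt",
--         "Margin",
--     ]
--
--     # Extract priority sections
--     extracted_sections = []
--     remaining_chars = max_chars
--
--     for keyword in priority_keywords:
--         if keyword in fundamental_data and remaining_chars > 0:
--             # Find section containing keyword
--             start_idx = fundamental_data.find(keyword)
--             # Find next section (marked by similar patterns)
--             end_idx = len(fundamental_data)
--             for next_keyword in priority_keywords:
--                 if next_keyword != keyword: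
--                     next_idx = fundamental_data.find(next_keyword, start_idx + 1)
--                     if next_idx > start_idx and next_idx < end_idx:
--                         end_idx = next_idx
--
--             section = fundamental_data[start_idx:end_idx].strip()
--             if len(section) <= remaining_chars:
--                 extracted_sections.append(section)
--                 remaining_chars -= len(section)
--             else:
--                 # Truncate section to fit
--                 extracted_sections.append(section[:remaining_chars])
--                 break
--
--     if extracted_sections:
--         return "\n\n".join(extracted_sections)
--
--     # Fallback to simple truncation
--     return fundamental_data[:max_chars]
-- ===== SOURCE B (Python) =====
-- def _optimize_fundamental_data(fundamental_data: str, max_chars: int, symbol: str) -> str: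
--     """Optimize fundamental data to fit context limits"""
--     if len(fundamental_data) <= max_chars:
--         return fundamental_data
--
--     priority_keywords = [
--         "COMPREHENSIVE FUNDAMENTAL ANALYSIS",
--         "QUARTERLY ANALYSES:",
--         "MULTI-QUARTER TRENDS:",
--         "OVERALL FUNDAMENTAL ASSESSMENT:",
--         "Financial Health Score:",
--         "Business Quality Score:",
--         "Growth Prospects Score:",
--         "Key Insights:",
--         "Investment Thesis:",
--         "Revenue",
--         "Net Income",
--         "EPS",
--         "Cash Flow",
--         "Debt",
--         "Margin",
--     ]
--
--     # Build an occurrence index once: every position of every keyword.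
--     def occurrences(kw):
--         ps = []
--         i = fundamental_data.find(kw)
--         while i != -1:
--             ps.append(i)
--             i = fundamental_data.find(kw, i + 1)
--         return ps
--
--     chains = [(kw, occurrences(kw)) for kw in priority_keywords]
--     index = sorted(((p, kw) for kw, ps in chains for p in ps), key=lambda t: t[0])
--
--     sections = []
--     remaining = max_chars
--     for kw, ps in chains:
--         if ps and remaining > 0:
--             start = ps[0]
--             # first indexed position after start that belongs to a different keyword
--             end = next((p for p, k in index if p > start and k != kw),
--                        len(fundamental_data))
--             section = fundamental_data[start:end].strip()
--             if len(section) <= remaining: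
--                 sections.append(section)
--                 remaining -= len(section)
--             else:
--                 sections.append(section[:remaining])
--                 break
--
--     if sections:
--         return "\n\n".join(sections)
--
--     return fundamental_data[:max_chars]
-- ===== Notes on version B (the rewrite author's own statement) =====
-- stated objective: alternative
-- what changed: B precomputes one sorted index of ALL occurrences of every priority keyword (repeated find per keyword, then one sort), and finds each section's end as the first indexed position after the section start that carries a different keyword, instead of A's per-keyword rescan of the whole text with 14 nested find calls.
import Mathlib
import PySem

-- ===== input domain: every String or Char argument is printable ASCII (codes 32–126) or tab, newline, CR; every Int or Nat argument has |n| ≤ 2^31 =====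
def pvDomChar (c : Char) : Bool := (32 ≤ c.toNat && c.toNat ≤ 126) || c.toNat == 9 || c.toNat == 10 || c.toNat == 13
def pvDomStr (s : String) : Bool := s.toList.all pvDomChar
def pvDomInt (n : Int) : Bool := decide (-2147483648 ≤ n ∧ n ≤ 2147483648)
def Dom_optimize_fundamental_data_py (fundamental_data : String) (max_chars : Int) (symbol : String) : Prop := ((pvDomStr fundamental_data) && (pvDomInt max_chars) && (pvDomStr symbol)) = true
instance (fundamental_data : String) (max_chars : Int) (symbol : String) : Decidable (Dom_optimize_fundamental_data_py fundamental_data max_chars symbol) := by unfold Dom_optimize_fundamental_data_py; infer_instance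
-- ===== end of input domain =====

-- B replaces A's per-keyword nested `.find` boundary scan by one precomputed sorted index of
-- ALL keyword occurrences, looked up for the next foreign occurrence (objective: alternative).

-- ===== PORT A =====
-- the function's priority_keywords constant, shared verbatim by both programs
def pvKeywords : List (List Char) :=
  [ "COMPREHENSIVE FUNDAMENTAL ANALYSIS".toList,
    "QUARTERLY ANALYSES:".toList,
    "MULTI-QUARTER TRENDS:".toList,
    "OVERALL FUNDAMENTAL ASSESSMENT:".toList,
    "Financial Health Score:".toList,
    "Business Quality Score:".toList,
    "Growth Prospects Score:".toList,
    "Key Insights:".toList,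
    "Investment Thesis:".toList,
    "Revenue".toList,
    "Net Income".toList,
    "EPS".toList,
    "Cash Flow".toList,
    "Debt".toList,
    "Margin".toList ]

-- A's inner `for next_keyword in priority_keywords: …` scan computing end_idx
def pvEndIdxA (t : List Char) (kw : List Char) (start : Int) : Int :=
  pvKeywords.foldl (fun e nk =>
    if nk ≠ kw then
      if PySem.Chars.findFrom t nk (start + 1) none > start ∧
          PySem.Chars.findFrom t nk (start + 1) none < e then
        PySem.Chars.findFrom t nk (start + 1) none
      else e
    else e) (PySem.List.len t)

-- A's outer `for keyword in priority_keywords: …` loop (break = returning acc directly)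
def pvLoopA (t : List Char) (kws : List (List Char)) (acc : List (List Char)) (rem : Int) :
    List (List Char) :=
  match kws with
  | [] => acc
  | kw :: rest =>
    if PySem.Chars.isIn kw t = true ∧ rem > 0 then
      let start := PySem.Chars.find t kw
      let endIdx := pvEndIdxA t kw start
      let sec := PySem.Chars.strip (PySem.List.slice t (some start) (some endIdx))
      if (sec.length : Int) ≤ rem then
        pvLoopA t rest (acc ++ [sec]) (rem - sec.length)
      else
        acc ++ [PySem.List.slice sec none (some rem)]
    else pvLoopA t rest acc rem

def optimize_fundamental_data_py (fundamental_data : String) (max_chars : Int)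
    (symbol : String) : String :=
  let t := fundamental_data.toList
  if PySem.List.len t ≤ max_chars then fundamental_data
  else
    let secs := pvLoopA t pvKeywords [] max_chars
    if secs ≠ [] then String.ofList (PySem.Chars.join "\n\n".toList secs)
    else String.ofList (PySem.List.slice t none (some max_chars))

-- ===== PORT B =====
-- B's `occurrences(kw)` while-loop: every position of kw, in increasing order
-- (the `i ≤ t.length` guard only makes the recursion total; Python's loop keeps it invariantly)
def pvChain (t kw : List Char) (i : Nat) : List Nat :=
  if h : i ≤ t.length then
    if hr : PySem.Chars.findFrom t kw (i : Int) none ≠ -1 then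
      (PySem.Chars.findFrom t kw (i : Int) none).toNat ::
        pvChain t kw ((PySem.Chars.findFrom t kw (i : Int) none).toNat + 1)
    else []
  else []
termination_by t.length + 1 - i
decreasing_by
  have hspec := PySem.Chars.findFrom_natCast_spec t kw i h hr
  omega

-- B's `next((p for p, k in index if p > start and k != kw), len(fundamental_data))`
def pvEndIdxB (t : List Char) (index : List (Nat × List Char)) (kw : List Char)
    (start : Nat) : Int :=
  match index.find? (fun x => decide (start < x.1) && decide (x.2 ≠ kw)) with
  | some x => (x.1 : Int)
  | none => (t.length : Int)

-- B's `for kw, ps in chains: …` loop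
def pvLoopB (t : List Char) (index : List (Nat × List Char))
    (chains : List (List Char × List Nat)) (acc : List (List Char)) (rem : Int) :
    List (List Char) :=
  match chains with
  | [] => acc
  | (kw, ps) :: rest =>
    if ps ≠ [] ∧ rem > 0 then
      let start := ps.headD 0
      let endIdx := pvEndIdxB t index kw start
      let sec := PySem.Chars.strip (PySem.List.slice t (some (start : Int)) (some endIdx))
      if (sec.length : Int) ≤ rem then
        pvLoopB t index rest (acc ++ [sec]) (rem - sec.length)
      else
        acc ++ [PySem.List.slice sec none (some rem)]
    else pvLoopB t index rest acc rem

def optimize_fundamental_data_py_alt (fundamental_data : String) (max_chars : Int)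
    (symbol : String) : String :=
  let t := fundamental_data.toList
  if PySem.List.len t ≤ max_chars then fundamental_data
  else
    let chains := pvKeywords.map (fun kw => (kw, pvChain t kw 0))
    let index := PySem.List.sorted
      (chains.flatMap (fun c => c.2.map (fun p => (p, c.1)))) (fun y => y.1) false
    let secs := pvLoopB t index chains [] max_chars
    if secs ≠ [] then String.ofList (PySem.Chars.join "\n\n".toList secs)
    else String.ofList (PySem.List.slice t none (some max_chars))

-- ===== PRECONDITION & SPEC =====
def Spec_optimize_fundamental_data_py (fundamental_data : String) (max_chars : Int) (symbol : String) (out : String) : Prop := out = optimize_fundamental_data_py_alt fundamental_data max_chars symbol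
instance (fundamental_data : String) (max_chars : Int) (symbol : String) (out : String) : Decidable (Spec_optimize_fundamental_data_py fundamental_data max_chars symbol out) := by unfold Spec_optimize_fundamental_data_py; infer_instance

-- ===== CLAIM (what is proved, stated in full; the proofs are below) =====
def Claim_equal_optimize_fundamental_data_py : Prop := ∀ (fundamental_data : String) (max_chars : Int) (symbol : String), Dom_optimize_fundamental_data_py fundamental_data max_chars symbol → Spec_optimize_fundamental_data_py fundamental_data max_chars symbol (optimize_fundamental_data_py fundamental_data max_chars symbol)

-- ===== LEMMAS AND PROOFS =====

theorem pvKeywords_ne_nil : ∀ kw ∈ pvKeywords, kw ≠ [] := by decide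

-- a prefix of `t.drop q` with i ≤ q is an infix of `t.drop i`
theorem pv_infix_of_prefix_drop {t sub : List Char} {i q : Nat} (hiq : i ≤ q)
    (hp : sub <+: t.drop q) : sub <:+: t.drop i := by
  refine List.infix_iff_prefix_suffix.2 ⟨t.drop q, hp, ?_⟩
  have h : t.drop q = (t.drop i).drop (q - i) := by
    rw [List.drop_drop]; congr 1; omega
  rw [h]; exact List.drop_suffix _ _

-- an occurrence of a nonempty keyword lies strictly inside t
theorem pv_occ_lt_length {t sub : List Char} {q : Nat} (hne : sub ≠ [])
    (hp : sub <+: t.drop q) : q < t.length := by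
  by_contra h
  have hd : t.drop q = [] := List.drop_eq_nil_of_le (by omega)
  rw [hd] at hp
  exact hne (List.prefix_nil.1 hp)

-- pvChain t kw i lists exactly the occurrences of kw at positions ≥ i
theorem pvChain_mem (t kw : List Char) (hkw : kw ≠ []) :
    ∀ (i q : Nat), q ∈ pvChain t kw i ↔ i ≤ q ∧ kw <+: t.drop q := by
  intro i
  induction i using pvChain.induct t kw with
  | case1 i h hr ih =>
    intro q
    rw [pvChain]
    rw [dif_pos h, dif_pos hr]
    obtain ⟨h1, h2, h3⟩ := PySem.Chars.findFrom_natCast_spec t kw i h hr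
    simp only [List.mem_cons]
    constructor
    · rintro (rfl | hq)
      · exact ⟨by omega, h2⟩
      · obtain ⟨hle, hp⟩ := (ih q).1 hq
        exact ⟨by omega, hp⟩
    · rintro ⟨hle, hp⟩
      rcases lt_trichotomy q (PySem.Chars.findFrom t kw (i : Int) none).toNat
        with hlt | rfl | hgt
      · exact absurd hp (h3 q hle hlt)
      · exact Or.inl rfl
      · exact Or.inr ((ih q).2 ⟨by omega, hp⟩)
  | case2 i h hr =>
    intro q
    rw [pvChain]
    rw [dif_pos h, dif_neg hr]
    simp only [List.not_mem_nil, false_iff]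
    rintro ⟨hle, hp⟩
    have hn : ¬ kw <:+: t.drop i :=
      (PySem.Chars.findFrom_natCast_eq_neg_one_iff t kw i h).1 (by omega)
    exact hn (pv_infix_of_prefix_drop hle hp)
  | case3 i h =>
    intro q
    rw [pvChain]
    rw [dif_neg h]
    simp only [List.not_mem_nil, false_iff]
    rintro ⟨hle, hp⟩
    exact absurd (pv_occ_lt_length hkw hp) (by omega)

-- membership in B's sorted occurrence index
theorem pvIndex_mem (t : List Char) (x : Nat × List Char) :
    x ∈ PySem.List.sorted
        ((pvKeywords.map (fun kw => (kw, pvChain t kw 0))).flatMap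
          (fun c => c.2.map (fun p => (p, c.1)))) (fun y => y.1) false
      ↔ x.2 ∈ pvKeywords ∧ x.2 <+: t.drop x.1 := by
  rw [PySem.List.mem_sorted]
  simp only [List.mem_flatMap, List.mem_map]
  constructor
  · rintro ⟨c, ⟨kw, hkw, rfl⟩, p, hp, rfl⟩
    exact ⟨hkw, ((pvChain_mem t kw (pvKeywords_ne_nil kw hkw) 0 p).1 hp).2⟩
  · rintro ⟨hkw, hp⟩
    exact ⟨(x.2, pvChain t x.2 0), ⟨x.2, hkw, rfl⟩, x.1,
      (pvChain_mem t x.2 (pvKeywords_ne_nil x.2 hkw) 0 x.1).2 ⟨Nat.zero_le _, hp⟩, rfl⟩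

-- the characterisation both end-index computations satisfy: first position after s
-- carrying a different priority keyword, defaulting to len(t)
def pvIsEnd (t kw : List Char) (s : Nat) (e : Int) : Prop :=
  (s : Int) < e ∧ e ≤ t.length ∧
  (e = t.length ∨ ∃ nk ∈ pvKeywords, nk ≠ kw ∧ nk <+: t.drop e.toNat) ∧
  (∀ q : Nat, s < q → (q : Int) < e → ∀ nk ∈ pvKeywords, nk ≠ kw → ¬ nk <+: t.drop q)

theorem pvIsEnd_unique {t kw : List Char} {s : Nat} {e e' : Int}
    (h : pvIsEnd t kw s e) (h' : pvIsEnd t kw s e') : e = e' := by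
  obtain ⟨hs, hle, hor, hmin⟩ := h
  obtain ⟨hs', hle', hor', hmin'⟩ := h'
  rcases lt_trichotomy e e' with hlt | heq | hgt
  · exfalso
    rcases hor with rfl | ⟨nk, hnk, hne, hp⟩
    · omega
    · exact hmin' e.toNat (by omega) (by omega) nk hnk hne hp
  · exact heq
  · exfalso
    rcases hor' with rfl | ⟨nk, hnk, hne, hp⟩
    · omega
    · exact hmin e'.toNat (by omega) (by omega) nk hnk hne hp

-- A's inner fold step, named for the invariant proof (pvEndIdxA unfolds to it)
def pvStepA (t kw : List Char) (start : Int) (e : Int) (nk : List Char) : Int :=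
  if nk ≠ kw then
    if PySem.Chars.findFrom t nk (start + 1) none > start ∧
        PySem.Chars.findFrom t nk (start + 1) none < e then
      PySem.Chars.findFrom t nk (start + 1) none
    else e
  else e

theorem pvEndIdxA_eq_foldl (t kw : List Char) (start : Int) :
    pvEndIdxA t kw start = pvKeywords.foldl (pvStepA t kw start) (PySem.List.len t) := rfl

-- invariant of A's inner fold
theorem pvFoldA_aux (t kw : List Char) (s : Nat) :
    ∀ (L : List (List Char)), (∀ nk ∈ L, nk ∈ pvKeywords) →
    ∀ e : Int, (s : Int) < e → e ≤ t.length →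
      (e = t.length ∨ ∃ nk ∈ pvKeywords, nk ≠ kw ∧ nk <+: t.drop e.toNat) →
      ((s : Int) < L.foldl (pvStepA t kw (s : Int)) e ∧
       L.foldl (pvStepA t kw (s : Int)) e ≤ t.length ∧
       (L.foldl (pvStepA t kw (s : Int)) e = t.length ∨
         ∃ nk ∈ pvKeywords, nk ≠ kw ∧
           nk <+: t.drop (L.foldl (pvStepA t kw (s : Int)) e).toNat) ∧
       L.foldl (pvStepA t kw (s : Int)) e ≤ e ∧
       (∀ q : Nat, s < q → (q : Int) < L.foldl (pvStepA t kw (s : Int)) e →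
         ∀ nk ∈ L, nk ≠ kw → ¬ nk <+: t.drop q)) := by
  intro L
  induction L with
  | nil =>
    intro _ e h1 h2 h3
    exact ⟨h1, h2, h3, le_refl _, by simp⟩
  | cons nk L ih =>
    intro hL e h1 h2 h3
    have hsl : s < t.length := by omega
    have hk1 : s + 1 ≤ t.length := by omega
    have hcast : (s : Int) + 1 = ((s + 1 : Nat) : Int) := by push_cast; ring
    rw [List.foldl_cons]
    -- facts about e1 := pvStepA t kw s e nk
    have key : (s : Int) < pvStepA t kw (s : Int) e nk ∧
        pvStepA t kw (s : Int) e nk ≤ e ∧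
        (pvStepA t kw (s : Int) e nk = e ∨
          (nk ∈ pvKeywords → nk ≠ kw ∧
            nk <+: t.drop (pvStepA t kw (s : Int) e nk).toNat)) ∧
        (nk ∈ pvKeywords → nk ≠ kw →
          ∀ q : Nat, s < q → (q : Int) < pvStepA t kw (s : Int) e nk →
            ¬ nk <+: t.drop q) := by
      unfold pvStepA
      by_cases hnk : nk ≠ kw
      · rw [if_pos hnk]
        by_cases hfound : PySem.Chars.findFrom t nk ((s : Int) + 1) none ≠ -1
        · rw [hcast] at hfound ⊢
          obtain ⟨hf1, hf2, hf3⟩ := PySem.Chars.findFrom_natCast_spec t nk (s + 1) hk1 hfound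
          by_cases hlt : PySem.Chars.findFrom t nk ((s + 1 : Nat) : Int) none < e
          · rw [if_pos ⟨by omega, hlt⟩]
            refine ⟨by omega, by omega, Or.inr (fun _ => ⟨hnk, hf2⟩), ?_⟩
            intro _ _ q hq1 hq2 hp
            exact hf3 q (by omega) (by omega) hp
          · rw [if_neg (by tauto)]
            refine ⟨h1, le_refl _, Or.inl rfl, ?_⟩
            intro _ _ q hq1 hq2 hp
            exact hf3 q (by omega) (by omega) hp
        · push_neg at hfound
          rw [if_neg (by rw [hfound]; omega)]
          refine ⟨h1, le_refl _, Or.inl rfl, ?_⟩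
          intro _ _ q hq1 hq2 hp
          rw [hcast] at hfound
          have hni : ¬ nk <:+: t.drop (s + 1) :=
            (PySem.Chars.findFrom_natCast_eq_neg_one_iff t nk (s + 1) hk1).1 hfound
          exact hni (pv_infix_of_prefix_drop (by omega) hp)
      · rw [if_neg hnk]
        exact ⟨h1, le_refl _, Or.inl rfl, fun _ hk => absurd hk (by tauto)⟩
    obtain ⟨k1, k2, k3, k4⟩ := key
    have hor1 : pvStepA t kw (s : Int) e nk = t.length ∨
        ∃ m ∈ pvKeywords, m ≠ kw ∧ m <+: t.drop (pvStepA t kw (s : Int) e nk).toNat := by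
      rcases k3 with heq | hocc
      · rw [heq]; exact h3
      · exact Or.inr ⟨nk, hL nk List.mem_cons_self, hocc (hL nk List.mem_cons_self)⟩
    obtain ⟨r1, r2, r3, r4, r5⟩ :=
      ih (fun m hm => hL m (List.mem_cons_of_mem _ hm)) (pvStepA t kw (s : Int) e nk)
        k1 (by omega) hor1
    refine ⟨r1, r2, r3, by omega, ?_⟩
    intro q hq1 hq2 m hm hne hp
    rcases List.mem_cons.1 hm with rfl | hmL
    · exact k4 (hL m List.mem_cons_self) hne q hq1 (by omega) hp
    · exact r5 q hq1 hq2 m hmL hne hp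

theorem pvEndIdxA_isEnd (t kw : List Char) (s : Nat) (hs : s < t.length) :
    pvIsEnd t kw s (pvEndIdxA t kw (s : Int)) := by
  rw [pvEndIdxA_eq_foldl]
  have hlen : PySem.List.len t = (t.length : Int) := by
    simp [PySem.List.len_eq]
  rw [hlen]
  obtain ⟨r1, r2, r3, _, r5⟩ :=
    pvFoldA_aux t kw s pvKeywords (fun _ hk => hk) (t.length : Int)
      (by omega) (le_refl _) (Or.inl rfl)
  exact ⟨r1, r2, r3, r5⟩

-- a find? hit on a key-sorted list has the least key among the hits
theorem pv_find?_first {α : Type} (key : α → Nat) (p : α → Bool) :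
    ∀ (l : List α) (x : α), l.Pairwise (fun a b => key a ≤ key b) →
      l.find? p = some x → ∀ y ∈ l, p y = true → key x ≤ key y := by
  intro l
  induction l with
  | nil => intro x _ hx; simp at hx
  | cons a l ih =>
    intro x hpw hx y hy hpy
    by_cases hpa : p a = true
    · rw [List.find?_cons_of_pos hpa] at hx
      cases hx
      rcases List.mem_cons.1 hy with rfl | hyl
      · exact le_refl _
      · exact (List.pairwise_cons.1 hpw).1 y hyl
    · rw [List.find?_cons_of_neg hpa] at hx
      rcases List.mem_cons.1 hy with rfl | hyl
      · exact absurd hpy hpa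
      · exact ih x (List.pairwise_cons.1 hpw).2 hx y hyl hpy

theorem pvEndIdxB_isEnd (t kw : List Char) (s : Nat) (hs : s < t.length) :
    pvIsEnd t kw s (pvEndIdxB t
      (PySem.List.sorted
        ((pvKeywords.map (fun k => (k, pvChain t k 0))).flatMap
          (fun c => c.2.map (fun p => (p, c.1)))) (fun y => y.1) false) kw s) := by
  unfold pvEndIdxB
  cases hfind : (PySem.List.sorted
      ((pvKeywords.map (fun k => (k, pvChain t k 0))).flatMap
        (fun c => c.2.map (fun p => (p, c.1)))) (fun y => y.1) false).find?
      (fun x => decide (s < x.1) && decide (x.2 ≠ kw)) with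
  | none =>
    show pvIsEnd t kw s ((t.length : Int))
    refine ⟨by omega, le_refl _, Or.inl rfl, ?_⟩
    intro q hq1 hq2 nk hnk hne hp
    have hmem : (q, nk) ∈ PySem.List.sorted
        ((pvKeywords.map (fun k => (k, pvChain t k 0))).flatMap
          (fun c => c.2.map (fun p => (p, c.1)))) (fun y => y.1) false :=
      (pvIndex_mem t (q, nk)).2 ⟨hnk, hp⟩
    have := List.find?_eq_none.1 hfind (q, nk) hmem
    simp only [Bool.and_eq_true, decide_eq_true_eq] at this
    exact this ⟨hq1, hne⟩
  | some x =>
    show pvIsEnd t kw s ((x.1 : Int))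
    have hpx := List.find?_some hfind
    simp only [Bool.and_eq_true, decide_eq_true_eq] at hpx
    obtain ⟨hsx, hxkw⟩ := hpx
    have hmem := List.mem_of_find?_eq_some hfind
    obtain ⟨hxin, hxp⟩ := (pvIndex_mem t x).1 hmem
    have hxlt : x.1 < t.length := pv_occ_lt_length (pvKeywords_ne_nil x.2 hxin) hxp
    refine ⟨by omega, by omega, Or.inr ⟨x.2, hxin, hxkw, by simpa using hxp⟩, ?_⟩
    intro q hq1 hq2 nk hnk hne hp
    have hqmem : (q, nk) ∈ PySem.List.sorted
        ((pvKeywords.map (fun k => (k, pvChain t k 0))).flatMap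
          (fun c => c.2.map (fun p => (p, c.1)))) (fun y => y.1) false :=
      (pvIndex_mem t (q, nk)).2 ⟨hnk, hp⟩
    have hpq : (fun y : Nat × List Char => decide (s < y.1) && decide (y.2 ≠ kw)) (q, nk)
        = true := by
      simp only [Bool.and_eq_true, decide_eq_true_eq]
      exact ⟨hq1, hne⟩
    have hle := pv_find?_first (fun y => y.1) _ _ x
      (PySem.List.sorted_pairwise _ _) hfind (q, nk) hqmem hpq
    simp only at hle
    omega

-- the head of B's per-keyword chain is A's find, when the keyword occurs
theorem pvChain_zero_cons (t kw : List Char) (h : 0 ≤ PySem.Chars.find t kw) :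
    pvChain t kw 0 = (PySem.Chars.find t kw).toNat ::
      pvChain t kw ((PySem.Chars.find t kw).toNat + 1) := by
  rw [pvChain]
  have h0 : ((0 : Nat) : Int) = 0 := by norm_num
  rw [dif_pos (Nat.zero_le _)]
  rw [h0, PySem.Chars.findFrom_zero]
  rw [dif_pos (by omega)]

theorem pvChain_zero_ne_nil_iff (t kw : List Char) (hkw : kw ≠ []) :
    pvChain t kw 0 ≠ [] ↔ PySem.Chars.isIn kw t = true := by
  constructor
  · intro h
    obtain ⟨q, hq⟩ := List.exists_mem_of_ne_nil _ h
    exact (PySem.Chars.exists_prefix_drop_iff_isIn kw t).1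
      ⟨q, ((pvChain_mem t kw hkw 0 q).1 hq).2⟩
  · intro h hnil
    obtain ⟨j, hj⟩ := (PySem.Chars.exists_prefix_drop_iff_isIn kw t).2 h
    have := (pvChain_mem t kw hkw 0 j).2 ⟨Nat.zero_le _, hj⟩
    rw [hnil] at this
    exact List.not_mem_nil this

-- the two outer loops agree
theorem pvLoop_eq (t : List Char) :
    ∀ (L : List (List Char)), (∀ kw ∈ L, kw ∈ pvKeywords) →
    ∀ (acc : List (List Char)) (rem : Int),
      pvLoopB t
        (PySem.List.sorted
          ((pvKeywords.map (fun k => (k, pvChain t k 0))).flatMap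
            (fun c => c.2.map (fun p => (p, c.1)))) (fun y => y.1) false)
        (L.map (fun kw => (kw, pvChain t kw 0))) acc rem
      = pvLoopA t L acc rem := by
  intro L
  induction L with
  | nil => intro _ acc rem; rfl
  | cons kw L ih =>
    intro hL acc rem
    have hkwin : kw ∈ pvKeywords := hL kw List.mem_cons_self
    have hkne : kw ≠ [] := pvKeywords_ne_nil kw hkwin
    have hL' : ∀ m ∈ L, m ∈ pvKeywords := fun m hm => hL m (List.mem_cons_of_mem _ hm)
    rw [List.map_cons]
    rw [pvLoopB, pvLoopA]
    by_cases hin : PySem.Chars.isIn kw t = true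
    · have hchain : pvChain t kw 0 ≠ [] := (pvChain_zero_ne_nil_iff t kw hkne).2 hin
      have hfind : 0 ≤ PySem.Chars.find t kw := by
        rw [PySem.Chars.find_nonneg_iff]
        exact (PySem.Chars.isIn_iff_infix kw t).1 hin
      have hhead : (pvChain t kw 0).headD 0 = (PySem.Chars.find t kw).toNat := by
        rw [pvChain_zero_cons t kw hfind]; rfl
      have hcast : (((PySem.Chars.find t kw).toNat : Nat) : Int) = PySem.Chars.find t kw :=
        Int.toNat_of_nonneg hfind
      have hocc : (PySem.Chars.find t kw).toNat < t.length :=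
        pv_occ_lt_length hkne (PySem.Chars.find_spec hfind).1
      have hend : pvEndIdxB t
          (PySem.List.sorted
            ((pvKeywords.map (fun k => (k, pvChain t k 0))).flatMap
              (fun c => c.2.map (fun p => (p, c.1)))) (fun y => y.1) false)
          kw (PySem.Chars.find t kw).toNat = pvEndIdxA t kw (PySem.Chars.find t kw) := by
        have hA := pvEndIdxA_isEnd t kw (PySem.Chars.find t kw).toNat hocc
        rw [hcast] at hA
        exact pvIsEnd_unique (pvEndIdxB_isEnd t kw (PySem.Chars.find t kw).toNat hocc) hA
      by_cases hrem : rem > 0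
      · rw [if_pos (show pvChain t kw 0 ≠ [] ∧ rem > 0 from ⟨hchain, hrem⟩),
          if_pos (show PySem.Chars.isIn kw t = true ∧ rem > 0 from ⟨hin, hrem⟩)]
        simp only [hhead, hend, hcast]
        by_cases hfit : ((PySem.Chars.strip (PySem.List.slice t
            (some (PySem.Chars.find t kw))
            (some (pvEndIdxA t kw (PySem.Chars.find t kw))))).length : Int) ≤ rem
        · rw [if_pos hfit, if_pos hfit]
          exact ih hL' _ _
        · rw [if_neg hfit, if_neg hfit]
      · rw [if_neg (by tauto), if_neg (by tauto)]
        exact ih hL' acc rem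
    · have hchain : ¬ pvChain t kw 0 ≠ [] := by
        rw [pvChain_zero_ne_nil_iff t kw hkne]
        exact hin
      rw [if_neg (by tauto), if_neg (by tauto)]
      exact ih hL' acc rem

-- ===== VERDICT (by name: the statement is the Claim_ definition above) =====
theorem optimize_fundamental_data_py_spec : Claim_equal_optimize_fundamental_data_py := by
  intro fd mc sym _
  unfold Spec_optimize_fundamental_data_py
  unfold optimize_fundamental_data_py optimize_fundamental_data_py_alt
  simp only
  rw [pvLoop_eq fd.toList pvKeywords (fun _ hk => hk)]
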